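-- pv_equiv track=rewrite | github.com/gregarendse/adventofcode | 2020/17/main.py | count
-- ===== SOURCE A (Python) =====
-- from typing import List
--
-- def count(grid: List[List[List[List[str]]]], state: str) -> int:
--     state_count: int = 0
--
--     for w in grid:
--         for z in w:
--             for y in z:
--                 for x in y:
--                     if x == state:
--                         state_count += 1
--
--     return state_count
-- ===== SOURCE B (Python) =====
-- from typing import List
--
-- def _leaves(node, state):
--     if isinstance(node, list):
--         return sum(_leaves(child, state) for child in node)
--     return 1 if node == state else 0
--
-- def count(grid: List[List[List[List[str]]]], state: str) -> int:
--     return _leaves(grid, state)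
-- ===== Notes on version B (the rewrite author's own statement) =====
-- stated objective: simpler
-- what changed: Replaces the four explicit nested loops with a single structural recursion over the nested lists that compares only at the leaves.
import Mathlib
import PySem

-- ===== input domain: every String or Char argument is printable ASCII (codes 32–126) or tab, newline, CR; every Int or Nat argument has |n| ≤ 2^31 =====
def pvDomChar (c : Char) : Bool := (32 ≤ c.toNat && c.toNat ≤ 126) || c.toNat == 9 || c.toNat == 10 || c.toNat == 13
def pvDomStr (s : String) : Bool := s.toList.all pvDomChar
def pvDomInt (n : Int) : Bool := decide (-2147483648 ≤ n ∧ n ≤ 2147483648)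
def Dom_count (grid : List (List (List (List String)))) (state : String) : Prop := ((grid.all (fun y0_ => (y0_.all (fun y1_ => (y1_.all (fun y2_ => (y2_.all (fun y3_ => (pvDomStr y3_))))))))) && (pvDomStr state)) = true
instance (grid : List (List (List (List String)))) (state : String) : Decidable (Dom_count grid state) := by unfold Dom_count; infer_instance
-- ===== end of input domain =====

-- ===== PORT A =====
-- literal port of A: four nested loops over an Int accumulator
def count (grid : List (List (List (List String)))) (state : String) : Int :=
  grid.foldl (fun acc w =>
    w.foldl (fun acc z =>
      z.foldl (fun acc y =>
        y.foldl (fun acc x =>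
          if x == state then acc + 1 else acc) acc) acc) acc) 0

-- ===== PORT B =====
-- port of B: structural recursion, one helper per nesting depth (the Python
-- _leaves recursion specialised to each list level), summing child results
def leaves0 (node : String) (state : String) : Int :=
  if node == state then 1 else 0
def leaves1 (node : List String) (state : String) : Int :=
  (node.map (fun c => leaves0 c state)).sum
def leaves2 (node : List (List String)) (state : String) : Int :=
  (node.map (fun c => leaves1 c state)).sum
def leaves3 (node : List (List (List String))) (state : String) : Int :=
  (node.map (fun c => leaves2 c state)).sum
def count_alt (grid : List (List (List (List String)))) (state : String) : Int :=
  (grid.map (fun c => leaves3 c state)).sum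

-- ===== PRECONDITION & SPEC =====
def Spec_count (grid : List (List (List (List String)))) (state : String) (out : Int) : Prop := out = count_alt grid state
instance (grid : List (List (List (List String)))) (state : String) (out : Int) : Decidable (Spec_count grid state out) := by unfold Spec_count; infer_instance

-- ===== CLAIM (what is proved, stated in full; the proofs are below) =====
def Claim_equal_count : Prop := ∀ (grid : List (List (List (List String)))) (state : String), Dom_count grid state → Spec_count grid state (count grid state)

-- ===== LEMMAS AND PROOFS =====

-- ===== VERDICT (by name: the statement is the Claim_ definition above) =====
theorem foldl0 (state : String) (y : List String) (a : Int) :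
    y.foldl (fun acc x => if x == state then acc + 1 else acc) a = a + leaves1 y state := by
  induction y generalizing a with
  | nil => simp [leaves1]
  | cons h t ih =>
    simp only [List.foldl_cons]
    rw [ih]
    simp only [leaves1, leaves0, List.map_cons, List.sum_cons]
    split <;> ring

theorem foldl1 (state : String) (z : List (List String)) (a : Int) :
    z.foldl (fun acc y => y.foldl (fun acc x => if x == state then acc + 1 else acc) acc) a
      = a + leaves2 z state := by
  induction z generalizing a with
  | nil => simp [leaves2]
  | cons h t ih =>
    simp only [List.foldl_cons]
    rw [foldl0, ih]
    simp only [leaves2, List.map_cons, List.sum_cons]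
    ring

theorem foldl2 (state : String) (w : List (List (List String))) (a : Int) :
    w.foldl (fun acc z => z.foldl (fun acc y => y.foldl (fun acc x => if x == state then acc + 1 else acc) acc) acc) a
      = a + leaves3 w state := by
  induction w generalizing a with
  | nil => simp [leaves3]
  | cons h t ih =>
    simp only [List.foldl_cons]
    rw [foldl1, ih]
    simp only [leaves3, List.map_cons, List.sum_cons]
    ring

theorem foldl3 (state : String) (g : List (List (List (List String)))) (a : Int) :
    g.foldl (fun acc w => w.foldl (fun acc z => z.foldl (fun acc y => y.foldl (fun acc x => if x == state then acc + 1 else acc) acc) acc) acc) a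
      = a + count_alt g state := by
  induction g generalizing a with
  | nil => simp [count_alt]
  | cons h t ih =>
    simp only [List.foldl_cons]
    rw [foldl2, ih]
    simp only [count_alt, List.map_cons, List.sum_cons]
    ring

theorem count_spec : Claim_equal_count := by
  intro grid state _
  unfold Spec_count count
  rw [foldl3]
  simp
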